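-- pv_equiv track=rewrite | github.com/ClaudioCarvalhoo/you-can-accomplish-anything-with-just-enough-determination-and-a-little-bit-of-luck | problems/LC1895.py | buildSecondDiagonalSum
-- ===== SOURCE A (Python) =====
-- def buildSecondDiagonalSum(grid):
--     secondDiagonalSum = []
--     for y in range(len(grid)):
--         secondDiagonalSum.append([])
--         for x in range(len(grid[y])):
--             prev = 0
--             if y > 0 and x < len(grid[y]) - 1:
--                 prev = secondDiagonalSum[y - 1][x + 1]
--             secondDiagonalSum[-1].append(prev + grid[y][x])
--     return secondDiagonalSum
-- ===== SOURCE B (Python) =====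
-- def buildSecondDiagonalSum(grid):
--     result = []
--     for y in range(len(grid)):
--         row = grid[y]
--         out = []
--         for x in range(len(row)):
--             total = 0
--             yy, xx = y, x
--             while True:
--                 total += grid[yy][xx]
--                 if yy == 0 or xx == len(grid[yy]) - 1:
--                     break
--                 yy -= 1
--                 xx += 1
--             out.append(total)
--         result.append(out)
--     return result
-- ===== Notes on version B (the rewrite author's own statement) =====
-- stated objective: alternative
-- what changed: Replaces A's row-by-row DP table (each cell reusing the previous row's entry) by an independent per-cell recomputation that walks the anti-diagonal up-and-to-the-right summing grid values, so no table of partial sums is kept.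
import Mathlib
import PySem

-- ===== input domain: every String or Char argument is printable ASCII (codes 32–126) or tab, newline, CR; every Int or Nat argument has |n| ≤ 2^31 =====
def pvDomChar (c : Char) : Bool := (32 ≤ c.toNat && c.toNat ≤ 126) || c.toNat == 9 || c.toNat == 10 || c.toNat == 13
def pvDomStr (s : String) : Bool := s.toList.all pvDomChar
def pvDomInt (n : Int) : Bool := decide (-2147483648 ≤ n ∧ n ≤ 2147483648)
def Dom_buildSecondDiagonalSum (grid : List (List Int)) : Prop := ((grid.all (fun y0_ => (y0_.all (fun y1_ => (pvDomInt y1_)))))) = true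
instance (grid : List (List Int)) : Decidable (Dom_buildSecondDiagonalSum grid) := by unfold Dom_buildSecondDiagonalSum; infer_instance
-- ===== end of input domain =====

-- B recomputes each cell's anti-diagonal sum independently by walking up-and-to-the-right,
-- instead of A's DP table that reuses the previous row's entry (objective: alternative).

-- ===== PORT A =====
-- A builds the table row by row; a cell of row y>0 (not last in its row) adds the entry
-- one up and one right from the already-built table.  The '.getD' defaults are reached
-- only outside Pre_ (where the Python raises IndexError).
def buildSecondDiagonalSum (grid : List (List Int)) : List (List Int) :=
  (PySem.List.pyRange 0 grid.length 1).foldl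
    (fun sds y =>
      let gy := (PySem.List.pyGet? grid y).getD []
      sds ++ [(PySem.List.pyRange 0 gy.length 1).foldl
        (fun row x =>
          let prev : Int :=
            if 0 < y ∧ x < (gy.length : Int) - 1 then
              PySem.List.pyGetD ((PySem.List.pyGet? sds (y - 1)).getD []) (x + 1) 0
            else 0
          row ++ [prev + PySem.List.pyGetD gy x 0])
        []])
    []

-- ===== PORT B =====
-- while-True walk of Source B: add grid[yy][xx]; stop at row 0 or at the last column of the
-- current row, else move up-right.  Terminates because yy decreases.
def pvWalk (grid : List (List Int)) (yy xx : Nat) : Int :=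
  let row := (PySem.List.pyGet? grid (yy : Int)).getD []
  let v := PySem.List.pyGetD row (xx : Int) 0
  if _h : yy = 0 ∨ (xx : Int) = (row.length : Int) - 1 then v
  else v + pvWalk grid (yy - 1) (xx + 1)
termination_by yy
decreasing_by omega

def buildSecondDiagonalSum_alt (grid : List (List Int)) : List (List Int) :=
  (List.range grid.length).map (fun y =>
    (List.range (grid.getD y []).length).map (fun x => pvWalk grid y x))

-- ===== PRECONDITION & SPEC =====
-- Pre_ excludes exactly the jagged grids on which Python A raises IndexError (a row of
-- length ≥ 2 longer than the row above it); Python B raises there too.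
def Pre_buildSecondDiagonalSum (grid : List (List Int)) : Prop :=
  ∀ y < grid.length, 0 < y → 2 ≤ (grid.getD y []).length →
    (grid.getD y []).length ≤ (grid.getD (y - 1) []).length
instance (grid : List (List Int)) : Decidable (Pre_buildSecondDiagonalSum grid) := by
  unfold Pre_buildSecondDiagonalSum; infer_instance

def pvWitness_buildSecondDiagonalSum : List (List Int) := [[1, 2], [3, 4]]

def Spec_buildSecondDiagonalSum (grid : List (List Int)) (out : List (List Int)) : Prop :=
  out = buildSecondDiagonalSum_alt grid
instance (grid : List (List Int)) (out : List (List Int)) : Decidable (Spec_buildSecondDiagonalSum grid out) := by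
  unfold Spec_buildSecondDiagonalSum; infer_instance

-- ===== CLAIM (what is proved, stated in full; the proofs are below) =====
def Claim_equal_buildSecondDiagonalSum : Prop :=
  ∀ (grid : List (List Int)), Dom_buildSecondDiagonalSum grid →
    Pre_buildSecondDiagonalSum grid →
    Spec_buildSecondDiagonalSum grid (buildSecondDiagonalSum grid)

-- ===== LEMMAS AND PROOFS =====

-- B's row y, as a named abbreviation for the proofs.
def pvRowB (grid : List (List Int)) (y : Nat) : List Int :=
  (List.range (grid.getD y []).length).map (fun x => pvWalk grid y x)

theorem pvAlt_eq (grid : List (List Int)) :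
    buildSecondDiagonalSum_alt grid = (List.range grid.length).map (pvRowB grid) := rfl

-- one unfolding of pvWalk, phrased with A's branch condition
theorem pvWalk_step (grid : List (List Int)) (y x : Nat) (_hy : y < grid.length)
    (hx : x < (grid.getD y []).length) :
    pvWalk grid y x =
      (if 0 < (y : Int) ∧ (x : Int) < ((grid.getD y []).length : Int) - 1 then
        pvWalk grid (y - 1) (x + 1) else 0) + (grid.getD y []).getD x 0 := by
  rw [pvWalk]
  simp only [PySem.List.pyGet?_natCast, PySem.List.pyGetD_natCast]
  have hg : grid[y]?.getD [] = grid.getD y [] := rfl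
  rw [hg]
  by_cases h : y = 0 ∨ (x : Int) = ((grid.getD y []).length : Int) - 1
  · rw [dif_pos h]
    rw [if_neg (by omega)]
    ring
  · rw [dif_neg h]
    rw [if_pos (by omega)]
    ring

-- the inner fold of A builds a list by appending singletons: it is B's row
theorem pvInner_eq_map (grid : List (List Int)) (sds : List (List Int)) (y : Nat)
    (gy : List Int) (hgy : gy = grid.getD y [])
    (hy : y < grid.length)
    (hsds : sds = (List.range y).map (pvRowB grid))
    (hpre : Pre_buildSecondDiagonalSum grid) :
    (PySem.List.pyRange 0 (gy.length : Int) 1).foldl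
      (fun row x =>
        row ++ [(if 0 < (y : Int) ∧ x < ((gy.length : Int)) - 1 then
            PySem.List.pyGetD ((PySem.List.pyGet? sds ((y : Int) - 1)).getD []) (x + 1) 0
          else 0) + PySem.List.pyGetD gy x 0])
      [] = pvRowB grid y := by
  subst hgy
  rw [PySem.List.foldl_append_singleton_eq_map, PySem.List.pyRange_zero_nat, List.map_map,
    List.nil_append]
  unfold pvRowB
  apply List.map_congr_left
  intro k hk
  rw [List.mem_range] at hk
  rw [pvWalk_step grid y k hy hk]
  simp only [Function.comp_apply, PySem.List.pyGetD_natCast]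
  congr 1
  by_cases h : 0 < (y : Int) ∧ (k : Int) < ((grid.getD y []).length : Int) - 1
  · rw [if_pos h, if_pos h]
    obtain ⟨h1, h2⟩ := h
    have hy0 : 0 < y := by exact_mod_cast h1
    have hL2 : 2 ≤ (grid.getD y []).length := by omega
    have hle := hpre y hy hy0 hL2
    have e1 : (y : Int) - 1 = ((y - 1 : Nat) : Int) := by omega
    have e2 : (k : Int) + 1 = ((k + 1 : Nat) : Int) := by omega
    rw [e1, e2, PySem.List.pyGet?_natCast, hsds, List.getElem?_map,
      List.getElem?_range (by omega : y - 1 < y)]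
    simp only [Option.map_some, Option.getD_some, pvRowB, PySem.List.pyGetD_natCast]
    exact PySem.List.getD_map_range _ _ _ _ (by omega)
  · rw [if_neg h, if_neg h]

theorem pvOuter (grid : List (List Int)) (hpre : Pre_buildSecondDiagonalSum grid) :
    ∀ m : Nat, m ≤ grid.length →
      (PySem.List.pyRange 0 (m : Int) 1).foldl
        (fun sds y =>
          let gy := (PySem.List.pyGet? grid y).getD []
          sds ++ [(PySem.List.pyRange 0 (gy.length : Int) 1).foldl
            (fun row x =>
              let prev : Int :=
                if 0 < y ∧ x < (gy.length : Int) - 1 then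
                  PySem.List.pyGetD ((PySem.List.pyGet? sds (y - 1)).getD []) (x + 1) 0
                else 0
              row ++ [prev + PySem.List.pyGetD gy x 0])
            []])
        [] = (List.range m).map (pvRowB grid) := by
  intro m
  induction m with
  | zero => intro _; rfl
  | succ m ih =>
    intro hm
    have e : ((m + 1 : Nat) : Int) = (m : Int) + 1 := by push_cast; ring
    rw [e, PySem.List.pyRange_one_succ_right (by positivity), List.foldl_append,
      ih (by omega), List.foldl_cons, List.foldl_nil]
    show (List.range m).map (pvRowB grid) ++
        [(PySem.List.pyRange 0 ((((PySem.List.pyGet? grid (m : Int)).getD []).length : Int)) 1).foldl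
          (fun row x =>
            row ++ [(if 0 < (m : Int) ∧ x < ((((PySem.List.pyGet? grid (m : Int)).getD []).length : Int)) - 1 then
                PySem.List.pyGetD ((PySem.List.pyGet? ((List.range m).map (pvRowB grid)) ((m : Int) - 1)).getD []) (x + 1) 0
              else 0) + PySem.List.pyGetD ((PySem.List.pyGet? grid (m : Int)).getD []) x 0])
          []] = (List.range (m + 1)).map (pvRowB grid)
    have hg : (PySem.List.pyGet? grid (m : Int)).getD [] = grid.getD m [] := by
      rw [PySem.List.pyGet?_natCast]; rfl
    rw [hg, List.range_succ, List.map_append, List.map_singleton]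
    congr 1
    exact congrArg (fun r => [r])
      (pvInner_eq_map grid ((List.range m).map (pvRowB grid)) m (grid.getD m []) rfl
        (by omega) rfl hpre)

-- ===== VERDICT (by name: the statement is the Claim_ definition above) =====
theorem buildSecondDiagonalSum_spec : Claim_equal_buildSecondDiagonalSum := by
  intro grid _ hpre
  unfold Spec_buildSecondDiagonalSum
  rw [pvAlt_eq]
  exact pvOuter grid hpre grid.length le_rfl
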